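-- pv_equiv track=rewrite | github.com/keith-packard/aoc-2019 | 22.py | fun_pow
-- ===== SOURCE A (Python) =====
-- def fun_compose(g,f, l):
--     return ((g[0] * f[0]) % l, (g[0] * f[1] + g[1]) % l)
--
-- def fun_pow(f, n, l):
--     r = (1, 0)
--     while n > 0:
--         if n & 1:
--             r = fun_compose(f, r, l)
--         f = fun_compose(f,f, l)
--         n >>= 1
--     return r
-- ===== SOURCE B (Python) =====
-- def fun_compose(g, f, l):
--     return ((g[0] * f[0]) % l, (g[0] * f[1] + g[1]) % l)
--
-- def fun_pow(f, n, l):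
--     # divide-and-conquer exponentiation by squaring (recursive)
--     if n <= 0:
--         return (1, 0)
--     half = fun_pow(f, n >> 1, l)
--     sq = fun_compose(half, half, l)
--     return fun_compose(f, sq, l) if n & 1 else sq
-- ===== Notes on version B (the rewrite author's own statement) =====
-- stated objective: alternative
-- what changed: Replaces A's bit-scanning while loop with its running accumulator r and repeated in-place squaring of f by recursive divide-and-conquer exponentiation by squaring: recurse on n>>1, square the half result with one compose, and compose with f once when n is odd.
import Mathlib
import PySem

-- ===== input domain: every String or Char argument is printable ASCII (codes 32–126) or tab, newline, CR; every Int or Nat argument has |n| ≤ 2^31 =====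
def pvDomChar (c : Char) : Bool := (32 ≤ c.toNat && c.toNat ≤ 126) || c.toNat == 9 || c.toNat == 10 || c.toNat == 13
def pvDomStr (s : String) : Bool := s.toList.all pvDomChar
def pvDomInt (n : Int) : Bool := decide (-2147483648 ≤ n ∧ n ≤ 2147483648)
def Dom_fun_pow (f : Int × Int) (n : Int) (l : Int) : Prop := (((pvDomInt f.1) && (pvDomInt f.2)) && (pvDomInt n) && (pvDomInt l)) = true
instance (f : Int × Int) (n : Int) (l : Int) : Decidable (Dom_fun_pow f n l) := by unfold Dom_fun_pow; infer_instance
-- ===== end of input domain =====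

-- B replaces A's bit-scanning while loop (running accumulator r, repeated squaring of f)
-- by recursive divide-and-conquer exponentiation by squaring; objective: alternative (same O(log n) cost).

-- ===== PORT A =====
-- helper fun_compose, shared verbatim by Source A and Source B
def fun_compose (g f : Int × Int) (l : Int) : Int × Int :=
  (PySem.Int.mod (g.1 * f.1) l, PySem.Int.mod (g.1 * f.2 + g.2) l)

-- A's while loop as structural recursion over the same state (f, n, r)
def funPowLoop (f : Int × Int) (n : Int) (r : Int × Int) (l : Int) : Int × Int :=
  if 0 < n then
    funPowLoop (fun_compose f f l) (n >>> (1 : Nat))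
      (if PySem.Int.band n 1 ≠ 0 then fun_compose f r l else r) l
  else r
termination_by n.toNat
decreasing_by simp only [Int.shiftRight_eq_div_pow, pow_one]; omega

def fun_pow (f : Int × Int) (n : Int) (l : Int) : Int × Int :=
  funPowLoop f n (1, 0) l

-- ===== PORT B =====
def fun_pow_alt (f : Int × Int) (n : Int) (l : Int) : Int × Int :=
  if n ≤ 0 then (1, 0)
  else
    let half := fun_pow_alt f (n >>> (1 : Nat)) l
    let sq := fun_compose half half l
    if PySem.Int.band n 1 ≠ 0 then fun_compose f sq l else sq
termination_by n.toNat
decreasing_by simp only [Int.shiftRight_eq_div_pow, pow_one]; omega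

-- ===== PRECONDITION & SPEC =====
-- Pre_ excludes exactly the inputs where the Python programs raise ZeroDivisionError:
-- the modulus l = 0 with n > 0 (then '% l' is executed; both A and B raise there).
def Pre_fun_pow (f : Int × Int) (n : Int) (l : Int) : Prop := 0 < n → l ≠ 0
instance (f : Int × Int) (n : Int) (l : Int) : Decidable (Pre_fun_pow f n l) := by unfold Pre_fun_pow; infer_instance

def pvWitness_fun_pow : (Int × Int) × Int × Int := ((3, 5), 6, 10)

def Spec_fun_pow (f : Int × Int) (n : Int) (l : Int) (out : Int × Int) : Prop := out = fun_pow_alt f n l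
instance (f : Int × Int) (n : Int) (l : Int) (out : Int × Int) : Decidable (Spec_fun_pow f n l out) := by unfold Spec_fun_pow; infer_instance

-- ===== CLAIM (what is proved, stated in full; the proofs are below) =====
def Claim_equal_fun_pow : Prop := ∀ (f : Int × Int) (n : Int) (l : Int), Dom_fun_pow f n l → Pre_fun_pow f n l → Spec_fun_pow f n l (fun_pow f n l)

-- ===== LEMMAS AND PROOFS =====

-- exact affine composition over ℤ (no modular reduction)
def affComp (g f : Int × Int) : Int × Int := (g.1 * f.1, g.1 * f.2 + g.2)

def affPow (f : Int × Int) : Nat → Int × Int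
  | 0 => (1, 0)
  | k + 1 => affComp f (affPow f k)

-- componentwise congruence mod l
def Rl (l : Int) (p q : Int × Int) : Prop := l ∣ p.1 - q.1 ∧ l ∣ p.2 - q.2

-- both components already reduced mod l
def Fx (l : Int) (p : Int × Int) : Prop :=
  PySem.Int.mod p.1 l = p.1 ∧ PySem.Int.mod p.2 l = p.2

theorem pmod_sub_self_dvd (a l : Int) : l ∣ PySem.Int.mod a l - a := by
  have h := PySem.Int.floordiv_mul_add_mod a l
  exact ⟨-(PySem.Int.floordiv a l), by linear_combination h⟩

theorem pmod_congr {l a b : Int} (h : l ∣ a - b) : PySem.Int.mod a l = PySem.Int.mod b l := by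
  by_cases hl : l = 0
  · obtain rfl : a = b := by have := Int.zero_dvd.mp (hl ▸ h); omega
    rfl
  · have da := pmod_sub_self_dvd a l
    have db := pmod_sub_self_dvd b l
    have hd : l ∣ PySem.Int.mod a l - PySem.Int.mod b l := by
      have e : PySem.Int.mod a l - PySem.Int.mod b l
          = (PySem.Int.mod a l - a) - (PySem.Int.mod b l - b) + (a - b) := by ring
      rw [e]; exact dvd_add (dvd_sub da db) h
    have hb : (PySem.Int.mod a l - PySem.Int.mod b l).natAbs < l.natAbs := by
      rcases lt_or_gt_of_ne hl with hneg | hpos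
      · have h1 := PySem.Int.mod_neg_bounds a hneg
        have h2 := PySem.Int.mod_neg_bounds b hneg
        omega
      · have h1 := PySem.Int.mod_nonneg a hpos
        have h2 := PySem.Int.mod_lt a hpos
        have h3 := PySem.Int.mod_nonneg b hpos
        have h4 := PySem.Int.mod_lt b hpos
        omega
    have hz := Int.eq_zero_of_dvd_of_natAbs_lt_natAbs hd hb
    omega

theorem pmod_idem (a l : Int) :
    PySem.Int.mod (PySem.Int.mod a l) l = PySem.Int.mod a l :=
  pmod_congr (pmod_sub_self_dvd a l)

theorem Rl_refl (l : Int) (p : Int × Int) : Rl l p p := ⟨by simp, by simp⟩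

theorem Rl_symm {l : Int} {p q : Int × Int} (h : Rl l p q) : Rl l q p := by
  obtain ⟨h1, h2⟩ := h
  exact ⟨by simpa [neg_sub] using dvd_neg.mpr h1, by simpa [neg_sub] using dvd_neg.mpr h2⟩

theorem Rl_trans {l : Int} {p q r : Int × Int} (h1 : Rl l p q) (h2 : Rl l q r) : Rl l p r := by
  constructor
  · rw [show p.1 - r.1 = (p.1 - q.1) + (q.1 - r.1) by ring]
    exact dvd_add h1.1 h2.1
  · rw [show p.2 - r.2 = (p.2 - q.2) + (q.2 - r.2) by ring]
    exact dvd_add h1.2 h2.2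

theorem affComp_congr {l : Int} {g g' f f' : Int × Int} (hg : Rl l g g') (hf : Rl l f f') :
    Rl l (affComp g f) (affComp g' f') := by
  obtain ⟨hg1, hg2⟩ := hg
  obtain ⟨hf1, hf2⟩ := hf
  constructor
  · rw [show (affComp g f).1 - (affComp g' f').1
        = g.1 * (f.1 - f'.1) + f'.1 * (g.1 - g'.1) by simp [affComp]; ring]
    exact dvd_add (hf1.mul_left _) (hg1.mul_left _)
  · rw [show (affComp g f).2 - (affComp g' f').2
        = g.1 * (f.2 - f'.2) + f'.2 * (g.1 - g'.1) + (g.2 - g'.2) by simp [affComp]; ring]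
    exact dvd_add (dvd_add (hf2.mul_left _) (hg1.mul_left _)) hg2

theorem fun_compose_congr {l : Int} {g g' f f' : Int × Int} (hg : Rl l g g') (hf : Rl l f f') :
    Rl l (fun_compose g f l) (affComp g' f') := by
  refine Rl_trans ⟨?_, ?_⟩ (affComp_congr hg hf)
  · exact pmod_sub_self_dvd (g.1 * f.1) l
  · exact pmod_sub_self_dvd (g.1 * f.2 + g.2) l

theorem fun_compose_Fx (g f : Int × Int) (l : Int) : Fx l (fun_compose g f l) :=
  ⟨pmod_idem _ _, pmod_idem _ _⟩

theorem affComp_assoc (a b c : Int × Int) :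
    affComp (affComp a b) c = affComp a (affComp b c) := by
  simp only [affComp, Prod.mk.injEq]
  constructor <;> ring

theorem affComp_one (p : Int × Int) : affComp p (1, 0) = p := by
  cases p; simp [affComp]

theorem one_affComp (p : Int × Int) : affComp (1, 0) p = p := by
  cases p; simp [affComp]

theorem affPow_succ (f : Int × Int) (k : Nat) : affPow f (k + 1) = affComp f (affPow f k) := rfl

theorem affPow_add (f : Int × Int) (a b : Nat) :
    affPow f (a + b) = affComp (affPow f a) (affPow f b) := by
  induction a with
  | zero => simp [affPow, one_affComp]
  | succ a ih =>
      rw [show a + 1 + b = (a + b) + 1 by omega, affPow_succ, ih, affPow_succ, affComp_assoc]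

theorem affPow_two (f : Int × Int) : affPow f 2 = affComp f f := by
  simp [affPow, affComp_one]

theorem affPow_succ' (f : Int × Int) (k : Nat) :
    affPow f (k + 1) = affComp (affPow f k) f := by
  have h := affPow_add f k 1
  simpa [affPow, affComp_one] using h

theorem affPow_double (f : Int × Int) (m : Nat) :
    affPow (affComp f f) m = affPow f (2 * m) := by
  induction m with
  | zero => simp [affPow]
  | succ m ih =>
      rw [affPow_succ, ih, show 2 * (m + 1) = 2 + 2 * m by omega, affPow_add, affPow_two]

theorem affPow_congr {l : Int} {f f' : Int × Int} (h : Rl l f f') (k : Nat) :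
    Rl l (affPow f k) (affPow f' k) := by
  induction k with
  | zero => exact Rl_refl l (1, 0)
  | succ k ih => exact affComp_congr h ih

theorem shift_one (n : Int) : n >>> (1 : Nat) = n / 2 := by
  simpa using Int.shiftRight_eq_div_pow n 1

theorem band_one_iff (n : Int) (hn : 0 < n) :
    (PySem.Int.band n 1 ≠ 0) ↔ n.toNat % 2 = 1 := by
  rw [PySem.Int.band_one, PySem.Int.mod_eq_emod_of_pos (by norm_num : (0:Int) < 2)]
  omega

-- invariant of A's loop: result ≡ affPow f n ∘ r componentwise mod l
theorem funPowLoop_R (l : Int) (k : Nat) : ∀ (n : Int), n.toNat = k → ∀ (f r : Int × Int),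
    Rl l (funPowLoop f n r l) (affComp (affPow f k) r) := by
  induction k using Nat.strong_induction_on with
  | _ k ih =>
    intro n hk f r
    rw [funPowLoop]
    split
    · rename_i hn
      have hsh := shift_one n
      have hk2 : (n >>> (1 : Nat)).toNat = k / 2 := by rw [hsh]; omega
      have hrec := ih (k / 2) (by omega) (n >>> (1 : Nat)) hk2 (fun_compose f f l)
        (if PySem.Int.band n 1 ≠ 0 then fun_compose f r l else r)
      have hff : Rl l (fun_compose f f l) (affComp f f) :=
        fun_compose_congr (Rl_refl l f) (Rl_refl l f)
      have hp : Rl l (affPow (fun_compose f f l) (k / 2)) (affPow f (2 * (k / 2))) := by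
        have h := affPow_congr hff (k / 2)
        rwa [affPow_double] at h
      by_cases hodd : PySem.Int.band n 1 ≠ 0
      · rw [if_pos hodd] at hrec ⊢
        have hk1 : k = 2 * (k / 2) + 1 := by
          have := (band_one_iff n hn).mp hodd; omega
        refine Rl_trans hrec ?_
        have h1 : Rl l (affComp (affPow (fun_compose f f l) (k / 2)) (fun_compose f r l))
                       (affComp (affPow f (2 * (k / 2))) (affComp f r)) :=
          affComp_congr hp (fun_compose_congr (Rl_refl l f) (Rl_refl l r))
        have heq : affComp (affPow f (2 * (k / 2))) (affComp f r) = affComp (affPow f k) r := by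
          rw [← affComp_assoc, ← affPow_succ', ← hk1]
        rwa [heq] at h1
      · rw [if_neg hodd] at hrec ⊢
        have hk1 : k = 2 * (k / 2) := by
          have h := (band_one_iff n hn).not.mp hodd; omega
        refine Rl_trans hrec ?_
        have h1 : Rl l (affComp (affPow (fun_compose f f l) (k / 2)) r)
                       (affComp (affPow f (2 * (k / 2))) r) :=
          affComp_congr hp (Rl_refl l r)
        rwa [← hk1] at h1
    · rename_i hn
      have hk0 : k = 0 := by omega
      subst hk0
      simp only [affPow, one_affComp]
      exact Rl_refl l r

-- invariant of B's recursion: result ≡ affPow f n componentwise mod l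
theorem fun_pow_alt_R (l : Int) (k : Nat) : ∀ (n : Int), n.toNat = k → ∀ (f : Int × Int),
    Rl l (fun_pow_alt f n l) (affPow f k) := by
  induction k using Nat.strong_induction_on with
  | _ k ih =>
    intro n hk f
    rw [fun_pow_alt]
    split
    · rename_i hn
      have hk0 : k = 0 := by omega
      subst hk0
      exact Rl_refl l (1, 0)
    · rename_i hn
      have hn' : 0 < n := by omega
      have hsh := shift_one n
      have hk2 : (n >>> (1 : Nat)).toNat = k / 2 := by rw [hsh]; omega
      have hhalf := ih (k / 2) (by omega) (n >>> (1 : Nat)) hk2 f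
      have hsq : Rl l (fun_compose (fun_pow_alt f (n >>> (1 : Nat)) l)
                                   (fun_pow_alt f (n >>> (1 : Nat)) l) l)
                      (affPow f (2 * (k / 2))) := by
        have h := fun_compose_congr hhalf hhalf
        rwa [← affPow_add, show k / 2 + k / 2 = 2 * (k / 2) by omega] at h
      by_cases hodd : PySem.Int.band n 1 ≠ 0
      · rw [if_pos hodd]
        have hk1 : k = 2 * (k / 2) + 1 := by
          have := (band_one_iff n hn').mp hodd; omega
        have h := fun_compose_congr (Rl_refl l f) hsq
        rwa [← affPow_succ, ← hk1] at h
      · rw [if_neg hodd]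
        have hk1 : k = 2 * (k / 2) := by
          have h := (band_one_iff n hn').not.mp hodd; omega
        rwa [← hk1] at hsq

-- once the loop body has run (n > 0), A's result is componentwise mod-reduced
theorem funPowLoop_Fx (l : Int) (k : Nat) : ∀ (n : Int), n.toNat = k → 0 < n →
    ∀ (f r : Int × Int), Fx l (funPowLoop f n r l) := by
  induction k using Nat.strong_induction_on with
  | _ k ih =>
    intro n hk hn f r
    rw [funPowLoop, if_pos hn]
    have hsh := shift_one n
    by_cases h2 : 0 < n >>> (1 : Nat)
    · exact ih ((n >>> (1 : Nat)).toNat) (by omega) (n >>> (1 : Nat)) rfl h2 _ _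
    · have hn1 : n = 1 := by omega
      subst hn1
      rw [funPowLoop, if_neg (by decide), if_pos (by decide)]
      exact fun_compose_Fx _ _ _

theorem fun_pow_alt_Fx (f : Int × Int) (n l : Int) (hn : 0 < n) : Fx l (fun_pow_alt f n l) := by
  rw [fun_pow_alt, if_neg (by omega : ¬ n ≤ 0)]
  dsimp only
  split
  · exact fun_compose_Fx _ _ _
  · exact fun_compose_Fx _ _ _

theorem eq_of_Fx_Rl {l : Int} {p q : Int × Int} (hp : Fx l p) (hq : Fx l q) (h : Rl l p q) :
    p = q := by
  have h1 : p.1 = q.1 := by rw [← hp.1, ← hq.1]; exact pmod_congr h.1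
  have h2 : p.2 = q.2 := by rw [← hp.2, ← hq.2]; exact pmod_congr h.2
  exact Prod.ext h1 h2

-- ===== VERDICT (by name: the statement is the Claim_ definition above) =====
theorem fun_pow_spec : Claim_equal_fun_pow := by
  intro f n l _ _
  unfold Spec_fun_pow
  by_cases hn : 0 < n
  · have hAF : Fx l (fun_pow f n l) := funPowLoop_Fx l n.toNat n rfl hn f (1, 0)
    have hBF : Fx l (fun_pow_alt f n l) := fun_pow_alt_Fx f n l hn
    have hAR : Rl l (fun_pow f n l) (affPow f n.toNat) := by
      have h := funPowLoop_R l n.toNat n rfl f (1, 0)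
      rwa [affComp_one] at h
    have hBR : Rl l (fun_pow_alt f n l) (affPow f n.toNat) := fun_pow_alt_R l n.toNat n rfl f
    exact eq_of_Fx_Rl hAF hBF (Rl_trans hAR (Rl_symm hBR))
  · rw [fun_pow, funPowLoop, if_neg hn, fun_pow_alt, if_pos (by omega : n ≤ 0)]
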